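-- pv_equiv track=rewrite | github.com/AnthonyCarbillet/Volumes_Finis_Equation_de_Saint-Venant | code/GeomMesh.py | Voisinage
-- ===== SOURCE A (Python) =====
-- from collections import defaultdict
--
-- def Voisinage(T):
--     # Renvoit une liste qui contient le triangle associé à chaque arête, pour chaque triangle
--     # Exemple [[ (Pour T0)[None , (arête1)], [T1 , (arête2)], [T5 , (arête3)]], ...( Pour T1 ), ...]
--     #T : liste des Triangles du maillage
--
--     # Étape 1 : construire le dictionnaire arête → triangles
--     ListeAretes = defaultdict(list) #Création d'un dictionnaire vide
--
--     for tri_idx, tri in enumerate(T):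
--         Aretes = [
--             tuple(sorted((int(tri[0]), int(tri[1])))),
--             tuple(sorted((int(tri[1]), int(tri[2])))),
--             tuple(sorted((int(tri[2]), int(tri[0]))))
--                 ]
--         for arete in Aretes:
--             ListeAretes[arete].append(tri_idx) # Liste mise à jour qui à chaque arête associe les triangles qui y sont liés
--
--     # Étape 2 : déterminer les voisins pour chaque triangle
--     triangle_voisins = []
--
--     for tri_idx, tri in enumerate(T):
--         Voisins = []
--         Aretes = [
--             tuple(sorted((int(tri[0]), int(tri[1])))),
--             tuple(sorted((int(tri[1]), int(tri[2])))),
--             tuple(sorted((int(tri[2]), int(tri[0]))))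
--                 ]
--         for arete in Aretes:
--             tris = ListeAretes[arete]
--             voisin = [t for t in tris if t != tri_idx]
--             Voisins.append((voisin[0] if voisin else None, arete))
--         triangle_voisins.append(Voisins) # Liste qui contient le triangle associé à chaque arête, pour chaque triangle
--
--     return triangle_voisins
-- ===== SOURCE B (Python) =====
-- def Voisinage(T):
--     # Alternative: no edge dictionary; for each edge do a direct first-match scan
--     # over the triangle list (first other triangle containing the edge).
--     def edges(tri):
--         return [
--             tuple(sorted((int(tri[0]), int(tri[1])))),
--             tuple(sorted((int(tri[1]), int(tri[2])))),
--             tuple(sorted((int(tri[2]), int(tri[0])))),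
--         ]
--     ET = list(enumerate(T))
--     def first_other(i, e):
--         for j, other in ET:
--             if j != i and e in edges(other):
--                 return j
--         return None
--     return [[(first_other(i, e), e) for e in edges(tri)] for i, tri in ET]
-- ===== Notes on version B (the rewrite author's own statement) =====
-- stated objective: alternative
-- what changed: B drops A's edge-to-triangles dictionary and its two enumeration passes entirely: for each of a triangle's three edges it does a direct first-match scan over the triangle list for the first other triangle containing that edge (list comprehensions plus a helper), trading A's O(n) hash index for a simpler dictionary-free O(n^2) scan.
import Mathlib
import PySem

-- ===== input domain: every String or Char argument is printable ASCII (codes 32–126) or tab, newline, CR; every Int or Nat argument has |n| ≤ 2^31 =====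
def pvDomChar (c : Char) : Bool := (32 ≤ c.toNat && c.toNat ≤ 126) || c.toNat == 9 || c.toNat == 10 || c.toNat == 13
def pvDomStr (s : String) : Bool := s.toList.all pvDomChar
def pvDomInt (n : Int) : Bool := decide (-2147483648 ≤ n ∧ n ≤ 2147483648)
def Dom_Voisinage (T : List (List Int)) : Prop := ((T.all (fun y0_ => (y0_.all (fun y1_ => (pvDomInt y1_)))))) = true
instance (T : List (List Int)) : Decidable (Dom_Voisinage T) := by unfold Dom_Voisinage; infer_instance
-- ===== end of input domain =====

-- B replaces A's edge→triangles dictionary by a direct first-match scan over the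
-- triangle list for each edge (alternative decomposition, not claimed faster).

-- tuple(sorted((a, b))) for two ints (shared by both ports)
def pvSortPair (a b : Int) : Int × Int := if a ≤ b then (a, b) else (b, a)

-- the three sorted edges of a triangle; pyGetD is exact under Pre_ (3 ≤ tri.length)
def pvTriEdges (tri : List Int) : List (Int × Int) :=
  [pvSortPair (PySem.List.pyGetD tri 0 0) (PySem.List.pyGetD tri 1 0),
   pvSortPair (PySem.List.pyGetD tri 1 0) (PySem.List.pyGetD tri 2 0),
   pvSortPair (PySem.List.pyGetD tri 2 0) (PySem.List.pyGetD tri 0 0)]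

-- ===== PORT A =====
def Voisinage (T : List (List Int)) : List (List (Option Int × (Int × Int))) :=
  let listeAretes : PySem.Dict (Int × Int) (List Int) :=
    (PySem.List.enumerate T).foldl
      (fun d p => (pvTriEdges p.2).foldl
        (fun d arete => d.modify arete [] (fun l => l ++ [p.1])) d)
      PySem.Dict.empty
  (PySem.List.enumerate T).foldl
    (fun acc p =>
      acc ++ [(pvTriEdges p.2).foldl
        (fun vs arete =>
          let tris := listeAretes.getD arete []
          let voisin := tris.filter (fun t => t ≠ p.1)
          vs ++ [(voisin.head?, arete)]) []])
    []

-- ===== PORT B =====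
-- 'for j, other in ET: if …: return j / return None'
def pvFindNb (i : Int) (e : Int × Int) : List (Int × List Int) → Option Int
  | [] => none
  | p :: rest =>
      if p.1 ≠ i ∧ (pvTriEdges p.2).contains e then some p.1 else pvFindNb i e rest

def Voisinage_alt (T : List (List Int)) : List (List (Option Int × (Int × Int))) :=
  let ET := PySem.List.enumerate T
  ET.map (fun p => (pvTriEdges p.2).map (fun e => (pvFindNb p.1 e ET, e)))

-- ===== PRECONDITION & SPEC =====
-- Pre_ : exactly the inputs where A returns (tri[2] raises IndexError on a shorter triangle)
def Pre_Voisinage (T : List (List Int)) : Prop := ∀ tri ∈ T, 3 ≤ tri.length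
instance (T : List (List Int)) : Decidable (Pre_Voisinage T) := by unfold Pre_Voisinage; infer_instance
def pvWitness_Voisinage : List (List Int) := [[0, 1, 2], [0, 1, 3]]

def Spec_Voisinage (T : List (List Int)) (out : List (List (Option Int × (Int × Int)))) : Prop := out = Voisinage_alt T
instance (T : List (List Int)) (out : List (List (Option Int × (Int × Int)))) : Decidable (Spec_Voisinage T out) := by unfold Spec_Voisinage; infer_instance

-- ===== CLAIM (what is proved, stated in full; the proofs are below) =====
def Claim_equal_Voisinage : Prop := ∀ (T : List (List Int)), Dom_Voisinage T → Pre_Voisinage T → Spec_Voisinage T (Voisinage T)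

-- ===== LEMMAS AND PROOFS =====

-- nested build loop = one loop over all (edge, triangle-index) pairs
def pvPairs (L : List (Int × List Int)) : List ((Int × Int) × Int) :=
  L.flatMap (fun p => (pvTriEdges p.2).map (fun e => (e, p.1)))

lemma pvBuild_eq_foldl_pairs (L : List (Int × List Int))
    (d : PySem.Dict (Int × Int) (List Int)) :
    L.foldl (fun d p => (pvTriEdges p.2).foldl
        (fun d arete => d.modify arete [] (fun l => l ++ [p.1])) d) d
      = (pvPairs L).foldl (fun d q => d.modify q.1 [] (fun l => l ++ [q.2])) d := by
  induction L generalizing d with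
  | nil => rfl
  | cons p rest ih =>
      simp only [pvPairs, List.flatMap_cons, List.foldl_cons, List.foldl_append, ih,
        List.foldl_map]

lemma pvBuild_getD (L : List (Int × List Int)) (e : Int × Int) :
    (L.foldl (fun d p => (pvTriEdges p.2).foldl
        (fun d arete => d.modify arete [] (fun l => l ++ [p.1])) d)
      PySem.Dict.empty).getD e []
      = ((pvPairs L).filter (fun q => q.1 == e)).map (·.2) := by
  rw [pvBuild_eq_foldl_pairs]
  simpa using PySem.Dict.getD_foldl_modify_append (pvPairs L) PySem.Dict.empty e

-- the per-edge lookup in A equals B's direct scan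
lemma pvBlock_eq (es : List (Int × Int)) (j : Int) (e : Int × Int) :
    ((es.map (fun e' => (e', j))).filter (fun q => q.1 == e)).map (·.2)
      = List.replicate (es.count e) j := by
  induction es with
  | nil => rfl
  | cons x xs ih =>
      by_cases hx : x = e
      · subst hx
        simp [ih, List.replicate_succ]
      · simp [hx, ih]

lemma pvScan_eq (L : List (Int × List Int)) (i : Int) (e : Int × Int) :
    ((((pvPairs L).filter (fun q => q.1 == e)).map (·.2)).filter
        (fun t => t ≠ i)).head? = pvFindNb i e L := by
  induction L with
  | nil => rfl
  | cons p rest ih =>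
      have hsplit : pvPairs (p :: rest)
          = (pvTriEdges p.2).map (fun e' => (e', p.1)) ++ pvPairs rest := by
        simp [pvPairs]
      rw [hsplit, List.filter_append, List.map_append, List.filter_append,
        List.head?_append, ih, pvBlock_eq, List.filter_replicate]
      by_cases hne : p.1 = i
      · simp [pvFindNb, hne]
      · by_cases hmem : e ∈ pvTriEdges p.2
        · have hc : (pvTriEdges p.2).count e ≠ 0 :=
            Nat.pos_iff_ne_zero.mp (List.count_pos_iff.mpr hmem)
          simp [pvFindNb, hne, hc, List.head?_replicate, hmem]
        · have hc : (pvTriEdges p.2).count e = 0 :=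
            List.count_eq_zero.mpr hmem
          simp [pvFindNb, hne, hc, hmem]

lemma Voisinage_eq_alt (T : List (List Int)) : Voisinage T = Voisinage_alt T := by
  simp only [Voisinage, Voisinage_alt, PySem.List.foldl_append_singleton_eq_map,
    List.nil_append]
  refine List.map_congr_left (fun p _ => ?_)
  refine List.map_congr_left (fun e _ => ?_)
  rw [pvBuild_getD, pvScan_eq]

-- ===== VERDICT (by name: the statement is the Claim_ definition above) =====
theorem Voisinage_spec : Claim_equal_Voisinage := by
  intro T _ _
  exact Voisinage_eq_alt T
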